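-- pv_equiv track=rewrite | github.com/ueebee/stockura.jp | app/domain/helpers/schedule_presets.py | get_presets_by_category
-- ===== SOURCE A (Python) =====
-- from typing import Dict, Optional
--
-- SCHEDULE_PRESETS: Dict[str, tuple[str, str]] = {
--     # 毎日実行パターン
--     "daily_morning": ("0 9 * * *", "毎日朝 9 時に実行"),
--     "daily_noon": ("0 12 * * *", "毎日正午に実行"),
--     "daily_evening": ("0 18 * * *", "毎日夕方 6 時に実行"),
--     "daily_night": ("0 21 * * *", "毎日夜 9 時に実行"),
--     "daily_midnight": ("0 0 * * *", "毎日深夜 0 時に実行"),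
--
--     # 営業日（平日）実行パターン
--     "business_days_morning": ("0 9 * * 1-5", "平日朝 9 時に実行"),
--     "business_days_evening": ("0 18 * * 1-5", "平日夕方 6 時に実行"),
--
--     # 週次実行パターン
--     "weekly_monday": ("0 9 * * 1", "毎週月曜日朝 9 時に実行"),
--     "weekly_friday": ("0 18 * * 5", "毎週金曜日夕方 6 時に実行"),
--     "weekly_sunday": ("0 9 * * 0", "毎週日曜日朝 9 時に実行"),
--
--     # 月次実行パターン
--     "monthly_first": ("0 9 1 * *", "毎月 1 日朝 9 時に実行"),
--     "monthly_last_business_day": ("0 18 28-31 * *", "毎月末付近の夕方 6 時に実行"),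
--
--     # マーケット時間に合わせたパターン
--     "market_open": ("0 9 * * 1-5", "市場開場時（平日 9 時）に実行"),
--     "market_close": ("0 15 * * 1-5", "市場閉場時（平日 15 時）に実行"),
--     "after_market": ("0 16 * * 1-5", "市場閉場後（平日 16 時）に実行"),
--
--     # 頻度の高い実行パターン
--     "every_hour": ("0 * * * *", "毎時 0 分に実行"),
--     "every_30_minutes": ("0,30 * * * *", "30 分ごとに実行"),
--     "every_15_minutes": ("0,15,30,45 * * * *", "15 分ごとに実行"),
-- }
--
-- def get_presets_by_category(category: str) -> Dict[str, Dict[str, str]]: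
--     """
--     カテゴリ別にプリセットを取得する
--
--     Args:
--         category: カテゴリ名（"daily", "weekly", "monthly", "market", "frequent"）
--
--     Returns:
--         該当するプリセット情報の辞書
--     """
--     category_filters = {
--         "daily": lambda name: name.startswith("daily_") or name.startswith("business_days_"),
--         "weekly": lambda name: name.startswith("weekly_"),
--         "monthly": lambda name: name.startswith("monthly_"),
--         "market": lambda name: "market" in name or name.startswith("after_market"),
--         "frequent": lambda name: "every_" in name,
--     }
--
--     filter_func = category_filters.get(category.lower())
--     if not filter_func:
--         return {}
--
--     return {
--         name: {
--             "cron_expression": cron_expr,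
--             "description": description
--         }
--         for name, (cron_expr, description) in SCHEDULE_PRESETS.items()
--         if filter_func(name)
--     }
-- ===== SOURCE B (Python) =====
-- from typing import Dict
--
-- SCHEDULE_PRESETS: Dict[str, tuple[str, str]] = {
--     "daily_morning": ("0 9 * * *", "毎日朝 9 時に実行"),
--     "daily_noon": ("0 12 * * *", "毎日正午に実行"),
--     "daily_evening": ("0 18 * * *", "毎日夕方 6 時に実行"),
--     "daily_night": ("0 21 * * *", "毎日夜 9 時に実行"),
--     "daily_midnight": ("0 0 * * *", "毎日深夜 0 時に実行"),
--     "business_days_morning": ("0 9 * * 1-5", "平日朝 9 時に実行"),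
--     "business_days_evening": ("0 18 * * 1-5", "平日夕方 6 時に実行"),
--     "weekly_monday": ("0 9 * * 1", "毎週月曜日朝 9 時に実行"),
--     "weekly_friday": ("0 18 * * 5", "毎週金曜日夕方 6 時に実行"),
--     "weekly_sunday": ("0 9 * * 0", "毎週日曜日朝 9 時に実行"),
--     "monthly_first": ("0 9 1 * *", "毎月 1 日朝 9 時に実行"),
--     "monthly_last_business_day": ("0 18 28-31 * *", "毎月末付近の夕方 6 時に実行"),
--     "market_open": ("0 9 * * 1-5", "市場開場時（平日 9 時）に実行"),
--     "market_close": ("0 15 * * 1-5", "市場閉場時（平日 15 時）に実行"),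
--     "after_market": ("0 16 * * 1-5", "市場閉場後（平日 16 時）に実行"),
--     "every_hour": ("0 * * * *", "毎時 0 分に実行"),
--     "every_30_minutes": ("0,30 * * * *", "30 分ごとに実行"),
--     "every_15_minutes": ("0,15,30,45 * * * *", "15 分ごとに実行"),
-- }
--
--
-- def _classify(name: str):
--     """Classify a preset name into its (unique) category, or None."""
--     if name.startswith("daily_") or name.startswith("business_days_"):
--         return "daily"
--     if name.startswith("weekly_"):
--         return "weekly"
--     if name.startswith("monthly_"):
--         return "monthly"
--     if "market" in name:
--         return "market"
--     if "every_" in name: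
--         return "frequent"
--     return None
--
--
-- def get_presets_by_category(category: str) -> Dict[str, Dict[str, str]]:
--     # Build the full category -> presets index in one pass, then look up.
--     index: Dict[str, Dict[str, Dict[str, str]]] = {}
--     for name, (cron_expr, description) in SCHEDULE_PRESETS.items():
--         cat = _classify(name)
--         if cat is not None:
--             index.setdefault(cat, {})[name] = {
--                 "cron_expression": cron_expr,
--                 "description": description,
--             }
--     return index.get(category.lower(), {})
-- ===== Notes on version B (the rewrite author's own statement) =====
-- stated objective: alternative
-- what changed: Instead of picking a filter predicate and filtering the preset table on demand, B classifies each preset name into its unique category in one pass, building a full category->presets index, and then answers with a single lookup of the lowered category.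
import Mathlib
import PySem

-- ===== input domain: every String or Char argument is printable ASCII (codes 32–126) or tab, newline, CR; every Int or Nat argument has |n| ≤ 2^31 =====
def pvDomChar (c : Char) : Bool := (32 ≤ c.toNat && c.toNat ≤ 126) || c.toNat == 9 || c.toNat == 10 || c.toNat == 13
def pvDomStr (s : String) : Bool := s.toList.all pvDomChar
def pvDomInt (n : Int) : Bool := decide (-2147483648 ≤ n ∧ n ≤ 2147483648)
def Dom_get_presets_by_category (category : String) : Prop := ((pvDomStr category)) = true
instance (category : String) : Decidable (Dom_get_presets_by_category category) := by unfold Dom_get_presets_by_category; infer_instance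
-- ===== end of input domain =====

-- B replaces A's predicate-selection-then-filter with a one-pass category->presets index plus a lookup (alternative decomposition, same cost).


def SCHEDULE_PRESETS : List (String × (String × String)) :=
  [ ("daily_morning", ("0 9 * * *", "毎日朝 9 時に実行")),
    ("daily_noon", ("0 12 * * *", "毎日正午に実行")),
    ("daily_evening", ("0 18 * * *", "毎日夕方 6 時に実行")),
    ("daily_night", ("0 21 * * *", "毎日夜 9 時に実行")),
    ("daily_midnight", ("0 0 * * *", "毎日深夜 0 時に実行")),
    ("business_days_morning", ("0 9 * * 1-5", "平日朝 9 時に実行")),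
    ("business_days_evening", ("0 18 * * 1-5", "平日夕方 6 時に実行")),
    ("weekly_monday", ("0 9 * * 1", "毎週月曜日朝 9 時に実行")),
    ("weekly_friday", ("0 18 * * 5", "毎週金曜日夕方 6 時に実行")),
    ("weekly_sunday", ("0 9 * * 0", "毎週日曜日朝 9 時に実行")),
    ("monthly_first", ("0 9 1 * *", "毎月 1 日朝 9 時に実行")),
    ("monthly_last_business_day", ("0 18 28-31 * *", "毎月末付近の夕方 6 時に実行")),
    ("market_open", ("0 9 * * 1-5", "市場開場時（平日 9 時）に実行")),
    ("market_close", ("0 15 * * 1-5", "市場閉場時（平日 15 時）に実行")),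
    ("after_market", ("0 16 * * 1-5", "市場閉場後（平日 16 時）に実行")),
    ("every_hour", ("0 * * * *", "毎時 0 分に実行")),
    ("every_30_minutes", ("0,30 * * * *", "30 分ごとに実行")),
    ("every_15_minutes", ("0,15,30,45 * * * *", "15 分ごとに実行")) ]

-- ===== PORT A =====
-- A: pick the filter predicate for the lowered category, then dict-comprehend over the presets.
def pvCategoryFilters : PySem.Dict String (String → Bool) :=
  PySem.Dict.ofList
    [ ("daily", fun name => PySem.Str.startswith name "daily_" || PySem.Str.startswith name "business_days_"),
      ("weekly", fun name => PySem.Str.startswith name "weekly_"),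
      ("monthly", fun name => PySem.Str.startswith name "monthly_"),
      ("market", fun name => PySem.Str.isIn "market" name || PySem.Str.startswith name "after_market"),
      ("frequent", fun name => PySem.Str.isIn "every_" name) ]

def get_presets_by_category (category : String) : List (String × List (String × String)) :=
  match pvCategoryFilters.get? (PySem.Str.lower category) with
  | none => []
  | some filterFunc =>
      -- dict comprehension: preset names are unique, so it is filter + map in table order
      (SCHEDULE_PRESETS.filter (fun p => filterFunc p.1)).map
        (fun p => (p.1, [("cron_expression", p.2.1), ("description", p.2.2)]))

-- ===== PORT B =====
-- B: classify each name into its unique category, build the whole index in one pass, then look up.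
def pvClassify (name : String) : Option String :=
  if PySem.Str.startswith name "daily_" || PySem.Str.startswith name "business_days_" then some "daily"
  else if PySem.Str.startswith name "weekly_" then some "weekly"
  else if PySem.Str.startswith name "monthly_" then some "monthly"
  else if PySem.Str.isIn "market" name then some "market"
  else if PySem.Str.isIn "every_" name then some "frequent"
  else none

def get_presets_by_category_alt (category : String) : List (String × List (String × String)) :=
  let index : PySem.Dict String (List (String × List (String × String))) :=
    SCHEDULE_PRESETS.foldl
      (fun idx p =>
        match pvClassify p.1 with
        | none => idx
        | some cat =>
            idx.modify cat []
              (fun m => m ++ [(p.1, [("cron_expression", p.2.1), ("description", p.2.2)])]))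
      PySem.Dict.empty
  (index.get? (PySem.Str.lower category)).getD []

-- ===== PRECONDITION & SPEC =====
def Spec_get_presets_by_category (category : String) (out : List (String × List (String × String))) : Prop := out = get_presets_by_category_alt category
instance (category : String) (out : List (String × List (String × String))) : Decidable (Spec_get_presets_by_category category out) := by unfold Spec_get_presets_by_category; infer_instance

-- ===== CLAIM (what is proved, stated in full; the proofs are below) =====
def Claim_equal_get_presets_by_category : Prop := ∀ (category : String), Dom_get_presets_by_category category → Spec_get_presets_by_category category (get_presets_by_category category)

-- ===== LEMMAS AND PROOFS =====

-- Both ports depend on the input only through `PySem.Str.lower category`; compare them for every string s.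
theorem pv_core_eq (s : String) :
    get_presets_by_category_alt s = get_presets_by_category s := by
  unfold get_presets_by_category get_presets_by_category_alt
  generalize PySem.Str.lower s = l
  by_cases h1 : l = "daily"
  · subst h1; decide
  by_cases h2 : l = "weekly"
  · subst h2; decide
  by_cases h3 : l = "monthly"
  · subst h3; decide
  by_cases h4 : l = "market"
  · subst h4; decide
  by_cases h5 : l = "frequent"
  · subst h5; decide
  -- unknown category: both lookups miss (neither dict has key l)
  have hA : pvCategoryFilters.get? l = none := by
    rw [PySem.Dict.get?_eq_none_iff_not_mem_keys]
    have hk : pvCategoryFilters.keys = ["daily", "weekly", "monthly", "market", "frequent"] := rfl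
    rw [hk]; simp [h1, h2, h3, h4, h5]
  have hB :
      (SCHEDULE_PRESETS.foldl
        (fun (idx : PySem.Dict String (List (String × List (String × String)))) p =>
          match pvClassify p.1 with
          | none => idx
          | some cat =>
              idx.modify cat []
                (fun m => m ++ [(p.1, [("cron_expression", p.2.1), ("description", p.2.2)])]))
        PySem.Dict.empty).get? l = none := by
    rw [PySem.Dict.get?_eq_none_iff_not_mem_keys]
    have hk : (SCHEDULE_PRESETS.foldl
        (fun (idx : PySem.Dict String (List (String × List (String × String)))) p =>
          match pvClassify p.1 with
          | none => idx
          | some cat =>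
              idx.modify cat []
                (fun m => m ++ [(p.1, [("cron_expression", p.2.1), ("description", p.2.2)])]))
        PySem.Dict.empty).keys = ["daily", "weekly", "monthly", "market", "frequent"] := by decide
    rw [hk]; simp [h1, h2, h3, h4, h5]
  simp [hA, hB]

-- ===== VERDICT (by name: the statement is the Claim_ definition above) =====
theorem get_presets_by_category_spec : Claim_equal_get_presets_by_category := by
  intro category _
  unfold Spec_get_presets_by_category
  exact (pv_core_eq category).symm
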